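-- pv_equiv track=rewrite | github.com/ROosterloo1988/zomercompetitie | src/zomercompetitie/services.py | choose_group_sizes
-- ===== SOURCE A (Python) =====
-- def choose_group_sizes(total_players: int) -> list[int]:
--     if total_players < 3:
--         raise ValueError("Kan geen geldige poules maken voor dit aantal spelers")
--
--     if total_players <= 6:
--         return [total_players]
--
--     group_count = (total_players + 5) // 6
--     base_size = total_players // group_count
--     remainder = total_players % group_count
--
--     groups = [base_size + (1 if idx < remainder else 0) for idx in range(group_count)]
--     if any(size < 3 or size > 6 for size in groups):
--         raise ValueError("Kan geen geldige poules maken voor dit aantal spelers")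
--     return groups
-- ===== SOURCE B (Python) =====
-- def choose_group_sizes(total_players: int) -> list[int]:
--     if total_players < 3:
--         raise ValueError("Kan geen geldige poules maken voor dit aantal spelers")
--     groups = []
--     remaining = total_players
--     for g in range((total_players + 5) // 6, 0, -1):
--         size = (remaining + g - 1) // g  # ceil of a fair share of what is left
--         groups.append(size)
--         remaining -= size
--     return groups
-- ===== Notes on version B (the rewrite author's own statement) =====
-- stated objective: alternative
-- what changed: B replaces the base/remainder formula, the per-group comprehension, the small-input fast path and the post-hoc validation pass with a single greedy loop that counts the group number down and peels off a ceil-of-fair-share group from the remaining players each iteration (those greedy sizes are always in the valid range, so no check is needed).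
import Mathlib
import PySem

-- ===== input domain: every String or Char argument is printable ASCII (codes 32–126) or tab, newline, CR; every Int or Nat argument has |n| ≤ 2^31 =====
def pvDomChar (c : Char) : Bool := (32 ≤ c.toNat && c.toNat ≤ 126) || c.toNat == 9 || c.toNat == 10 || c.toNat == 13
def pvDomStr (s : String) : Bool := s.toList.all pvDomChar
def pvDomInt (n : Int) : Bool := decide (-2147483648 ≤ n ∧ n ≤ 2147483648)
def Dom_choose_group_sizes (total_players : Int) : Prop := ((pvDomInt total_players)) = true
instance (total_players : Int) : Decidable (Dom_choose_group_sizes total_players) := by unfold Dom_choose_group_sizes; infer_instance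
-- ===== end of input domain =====

-- B replaces A's base/remainder formula, per-group comprehension and validation pass with a
-- greedy countdown loop peeling off a ceil-of-fair-share group from the remaining players
-- (objective: alternative decomposition); A = B is proved on all inputs where A returns.

-- ===== PORT A =====
def choose_group_sizes (total_players : Int) : List Int :=
  if total_players < 3 then []  -- Python raises ValueError here: excluded by Pre_
  else if total_players ≤ 6 then [total_players]
  else
    let group_count := PySem.Int.floordiv (total_players + 5) 6
    let base_size := PySem.Int.floordiv total_players group_count
    let remainder := PySem.Int.mod total_players group_count
    let groups := (PySem.List.pyRange 0 group_count 1).map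
      (fun idx => base_size + (if idx < remainder then 1 else 0))
    if groups.any (fun size => decide (size < 3) || decide (6 < size)) then []  -- raise: excluded by Pre_
    else groups

-- ===== PORT B =====
def choose_group_sizes_alt (total_players : Int) : List Int :=
  if total_players < 3 then []  -- Python raises ValueError here: excluded by Pre_
  else
    -- for g in range((total_players + 5) // 6, 0, -1): size = (remaining + g - 1) // g; append; subtract
    let fin := (PySem.List.pyRange (PySem.Int.floordiv (total_players + 5) 6) 0 (-1)).foldl
      (fun (st : List Int × Int) g =>
        let size := PySem.Int.floordiv (st.2 + g - 1) g
        (st.1 ++ [size], st.2 - size))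
      ([], total_players)
    fin.1

-- ===== PRECONDITION & SPEC =====
-- Pre_ excludes exactly total_players < 3, where the Python A raises ValueError
-- (for total_players ≥ 3 A's final any-check never fires, so A returns normally).
def Pre_choose_group_sizes (total_players : Int) : Prop := 3 ≤ total_players
instance (total_players : Int) : Decidable (Pre_choose_group_sizes total_players) := by
  unfold Pre_choose_group_sizes; infer_instance
def pvWitness_choose_group_sizes : Int := 17

def Spec_choose_group_sizes (total_players : Int) (out : List Int) : Prop := out = choose_group_sizes_alt total_players
instance (total_players : Int) (out : List Int) : Decidable (Spec_choose_group_sizes total_players out) := by unfold Spec_choose_group_sizes; infer_instance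

-- ===== CLAIM (what is proved, stated in full; the proofs are below) =====
def Claim_equal_choose_group_sizes : Prop := ∀ (total_players : Int), Dom_choose_group_sizes total_players → Pre_choose_group_sizes total_players → Spec_choose_group_sizes total_players (choose_group_sizes total_players)

-- ===== LEMMAS AND PROOFS =====

-- closed form of A's group-size list for m players in g groups
def pvCF (g m : Nat) : List Int :=
  (List.range g).map (fun i => ((m / g : Nat) : Int) + if i < m % g then 1 else 0)

-- greedy ceil-peeling recursion (the mathematical content of B's loop)
def pvPeel : Nat → Nat → List Int
  | 0, _ => []
  | (k+1), m => ((((m + k) / (k + 1) : Nat)) : Int) :: pvPeel k (m - (m + k) / (k + 1))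

lemma pvPeel_le (k m : Nat) : (m + k) / (k + 1) ≤ m := by
  have h1 : m + k ≤ m * (k + 1) + k := by
    have := Nat.le_mul_of_pos_right m (show 0 < k + 1 by omega)
    omega
  have h2 : (m + k) / (k + 1) ≤ (m * (k + 1) + k) / (k + 1) := Nat.div_le_div_right h1
  have h3 : (m * (k + 1) + k) / (k + 1) = m := by
    rw [Nat.mul_comm, Nat.mul_add_div (by omega)]
    simp [Nat.div_eq_of_lt (show k < k + 1 by omega)]
  omega

lemma pvCF_cons (k m : Nat) :
    pvCF (k + 2) m
      = (((m + k + 1) / (k + 2) : Nat) : Int) :: pvCF (k + 1) (m - (m + k + 1) / (k + 2)) := by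
  have hg : 0 < k + 2 := by omega
  have hdm := Nat.div_add_mod m (k + 2)
  have hr : m % (k + 2) < k + 2 := Nat.mod_lt _ hg
  set q := m / (k + 2) with hq
  set r := m % (k + 2) with hrdef
  -- s = q + (1 if r > 0 else 0)
  have hs : (m + k + 1) / (k + 2) = q + (if r = 0 then 0 else 1) := by
    have hm' : m + k + 1 = (k + 2) * q + (r + k + 1) := by omega
    rw [hm', Nat.mul_add_div hg]
    by_cases h0 : r = 0
    · simp [h0, Nat.div_eq_of_lt (show k + 1 < k + 2 by omega)]
    · have : r + k + 1 = (k + 2) * 1 + (r - 1) := by omega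
      rw [this, Nat.mul_add_div hg, Nat.div_eq_of_lt (by omega)]
      simp [h0]
  set s := (m + k + 1) / (k + 2) with hsdef
  have hsle : s ≤ m := by
    have := pvPeel_le (k + 1) m
    simpa [hsdef, show m + (k + 1) = m + k + 1 by omega] using this
  -- remaining players and their division by k+1 groups
  have hm2 : m - s = (k + 1) * q + (r - (if r = 0 then 0 else 1)) := by
    have hmul : (k + 2) * q = (k + 1) * q + q := by ring
    by_cases h0 : r = 0 <;> simp [h0] at hs ⊢ <;> omega
  have hr2 : r - (if r = 0 then 0 else 1) < k + 1 := by split_ifs <;> omega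
  have hdiv2 : (m - s) / (k + 1) = q := by
    rw [hm2, Nat.mul_add_div (by omega), Nat.div_eq_of_lt hr2]
    omega
  have hmod2 : (m - s) % (k + 1) = r - (if r = 0 then 0 else 1) := by
    rw [hm2, Nat.mul_add_mod, Nat.mod_eq_of_lt hr2]
  apply List.ext_getElem
  · simp [pvCF]
  · intro i h1 h2
    have hig : i < k + 2 := by simpa [pvCF] using h1
    rcases i with _ | j
    · simp only [pvCF, List.getElem_map, List.getElem_range, List.getElem_cons_zero, ← hq, ← hrdef]
      rw [hs]
      by_cases h0 : r = 0 <;> simp [h0] <;> push_cast <;> omega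
    · have hj : j < k + 1 := by omega
      simp only [pvCF, List.getElem_map, List.getElem_range, List.getElem_cons_succ, ← hq, ← hrdef,
        hdiv2, hmod2]
      by_cases h0 : r = 0 <;> simp [h0] <;> push_cast <;> omega

lemma pvPeel_eq_pvCF : ∀ g m : Nat, 0 < g → pvPeel g m = pvCF g m := by
  intro g
  induction g with
  | zero => intro m h; omega
  | succ k ih =>
    intro m _
    rcases k with _ | k'
    · simp [pvPeel, pvCF, Nat.mod_one]
    · rw [pvPeel, ih _ (by omega), show m + (k' + 1) = m + k' + 1 from by omega, pvCF_cons]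

-- B's loop, unrolled: it appends exactly the ceil-peeling list
lemma pvLoop_eq_peel : ∀ (g m : Nat) (gs : List Int),
    ((PySem.List.pyRange (g : Int) 0 (-1)).foldl
      (fun (st : List Int × Int) gg =>
        (st.1 ++ [PySem.Int.floordiv (st.2 + gg - 1) gg], st.2 - PySem.Int.floordiv (st.2 + gg - 1) gg))
      (gs, (m : Int))).1 = gs ++ pvPeel g m := by
  intro g
  induction g with
  | zero => intro m gs; simp [PySem.List.pyRange_neg_one_eq_nil, pvPeel]
  | succ k ih =>
    intro m gs
    rw [PySem.List.pyRange_neg_one_cons (by exact_mod_cast Nat.succ_pos k), List.foldl_cons]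
    have hsz : PySem.Int.floordiv ((m : Int) + ((k + 1 : Nat) : Int) - 1) ((k + 1 : Nat) : Int)
        = (((m + k) / (k + 1) : Nat) : Int) := by
      have hcast : (m : Int) + ((k + 1 : Nat) : Int) - 1 = ((m + k : Nat) : Int) := by push_cast; ring
      rw [hcast, PySem.Int.floordiv_natCast]
    have hsub : (m : Int) - (((m + k) / (k + 1) : Nat) : Int) = ((m - (m + k) / (k + 1) : Nat) : Int) := by
      rw [Nat.cast_sub (pvPeel_le k m)]
    have hdec : ((k + 1 : Nat) : Int) - 1 = ((k : Nat) : Int) := by push_cast; ring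
    simp only [hsz, hsub, hdec]
    rw [ih]
    simp [pvPeel]

-- A's comprehension is the closed form pvCF
lemma pvA_map_eq (m g : Nat) :
    (PySem.List.pyRange 0 ((g : Nat) : Int) 1).map
      (fun idx => PySem.Int.floordiv (m : Int) ((g : Nat) : Int)
        + (if idx < PySem.Int.mod (m : Int) ((g : Nat) : Int) then 1 else 0))
      = pvCF g m := by
  rw [PySem.List.pyRange_zero_natCast, List.map_map]
  unfold pvCF
  refine List.map_congr_left ?_
  intro i _
  simp only [Function.comp_apply, PySem.Int.floordiv_natCast, PySem.Int.mod_natCast, Nat.cast_lt]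

-- for m ≥ 7 every size of pvCF ((m+5)/6) m lies in [3,6], so A's guard never fires
lemma pvGuard_false (m : Nat) (hm : 7 ≤ m) :
    (pvCF ((m + 5) / 6) m).any (fun size => decide (size < 3) || decide (6 < size)) = false := by
  set g := (m + 5) / 6 with hgdef
  have h6 := Nat.div_add_mod (m + 5) 6
  have h6r : (m + 5) % 6 < 6 := Nat.mod_lt _ (by omega)
  have hg2 : 2 ≤ g := by omega
  have hmub : m ≤ 6 * g := by omega
  have hmlb : 3 * g ≤ m := by omega
  have hg0 : 0 < g := by omega
  have hdm := Nat.div_add_mod m g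
  have hrlt : m % g < g := Nat.mod_lt _ hg0
  have hq3 : 3 ≤ m / g := (Nat.le_div_iff_mul_le hg0).mpr (by omega)
  have hq6 : m / g ≤ 6 := by
    have : m / g < 7 := (Nat.div_lt_iff_lt_mul hg0).mpr (by omega)
    omega
  rw [List.any_eq_false]
  intro x hx
  simp only [pvCF, List.mem_map, List.mem_range] at hx
  obtain ⟨i, hi, rfl⟩ := hx
  have hboost : i < m % g → m / g ≤ 5 := by
    intro hir
    by_contra h
    have hq : m / g = 6 := by omega
    rw [hq] at hdm
    omega
  by_cases hir : i < m % g
  · have h5 := hboost hir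
    rw [if_pos hir]
    simp only [Bool.or_eq_true, decide_eq_true_eq, not_or, not_lt]
    push_cast
    omega
  · rw [if_neg hir]
    simp only [Bool.or_eq_true, decide_eq_true_eq, not_or, not_lt]
    push_cast
    omega

-- ===== VERDICT (by name: the statement is the Claim_ definition above) =====
theorem choose_group_sizes_spec : Claim_equal_choose_group_sizes := by
  intro n _ hPre
  have hPre' : 3 ≤ n := hPre
  unfold Spec_choose_group_sizes
  by_cases h6 : n ≤ 6
  · interval_cases n <;> decide
  · obtain ⟨m, rfl⟩ : ∃ m : Nat, n = (m : Int) := ⟨n.toNat, by omega⟩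
    have hm : 7 ≤ m := by exact_mod_cast (by omega : (7:Int) ≤ (m:Int))
    have hg0 : 0 < (m + 5) / 6 := by omega
    have hgc : PySem.Int.floordiv ((m : Int) + 5) 6 = (((m + 5) / 6 : Nat) : Int) := by
      have h := PySem.Int.floordiv_natCast (m + 5) 6
      push_cast at h ⊢
      exact h
    have hA : choose_group_sizes (m : Int) = pvCF ((m + 5) / 6) m := by
      simp only [choose_group_sizes, if_neg (by omega : ¬ (m:Int) < 3), if_neg h6, hgc,
        pvA_map_eq m ((m + 5) / 6), pvGuard_false m hm, Bool.false_eq_true, if_neg,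
        not_false_eq_true]
    have hB : choose_group_sizes_alt (m : Int) = pvCF ((m + 5) / 6) m := by
      simp only [choose_group_sizes_alt, if_neg (by omega : ¬ (m:Int) < 3), hgc]
      rw [pvLoop_eq_peel ((m + 5) / 6) m []]
      simpa using pvPeel_eq_pvCF _ m hg0
    rw [hA, hB]
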